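-- pv_equiv track=rewrite | github.com/wink4u/Algorithm | 프로그래머스/파이썬/2025 프로그래머스 코드챌린지 1차 예선/비밀코드해독.py | solution
-- ===== SOURCE A (Python) =====
-- from itertools import combinations
--
-- def solution(n, q, ans):
--     answer = 0
--
--     nums = list(combinations([i for i in range(1, n + 1)], 5))
--
--     for num in nums:
--         flag = 0
--
--         for i in range(len(q)):
--             cnt = 0
--             for j in range(5):
--                 if q[i][j] in num:
--                     cnt += 1
--             if cnt != ans[i]:
--                 flag = 1
--                 break
--
--         if not flag:
--             answer += 1
--     return answer
-- ===== SOURCE B (Python) =====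
-- def solution(n, q, ans):
--     pairs = list(zip(q, ans))
--     need = [a for _, a in pairs]
--
--     def count(pool, r, cnt):
--         # prune: counters only grow along an extension, so an overshoot is final
--         if any(c > t for c, t in zip(cnt, need)):
--             return 0
--         if r == 0:
--             return 1 if cnt == need else 0
--         if not pool:
--             return 0
--         x, rest = pool[0], pool[1:]
--         taken = [c + row[:5].count(x) for c, (row, _) in zip(cnt, pairs)]
--         return count(rest, r - 1, taken) + count(rest, r, cnt)
--
--     return count(list(range(1, n + 1)), 5, [0] * len(pairs))
-- ===== Notes on version B (the rewrite author's own statement) =====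
-- stated objective: alternative
-- what changed: A materializes every 5-combination and re-tests each against all queries with a flag/break loop; B never builds the combination list: it runs an include/exclude DFS over the number pool, carrying a vector of per-query overlap counters updated incrementally via row[:5].count(x) at each inclusion, and prunes a whole branch as soon as any counter overshoots its target.
-- outside the precondition, e.g. on solution(5, [[1, 2, 3, 4, 5], [1]], [5, 9]): A raises IndexError, B returns 0; on solution(5, [[1, 2, 3, 4, 5], [1]], [9, 9]): A returns 0, B returns 0
import Mathlib
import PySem

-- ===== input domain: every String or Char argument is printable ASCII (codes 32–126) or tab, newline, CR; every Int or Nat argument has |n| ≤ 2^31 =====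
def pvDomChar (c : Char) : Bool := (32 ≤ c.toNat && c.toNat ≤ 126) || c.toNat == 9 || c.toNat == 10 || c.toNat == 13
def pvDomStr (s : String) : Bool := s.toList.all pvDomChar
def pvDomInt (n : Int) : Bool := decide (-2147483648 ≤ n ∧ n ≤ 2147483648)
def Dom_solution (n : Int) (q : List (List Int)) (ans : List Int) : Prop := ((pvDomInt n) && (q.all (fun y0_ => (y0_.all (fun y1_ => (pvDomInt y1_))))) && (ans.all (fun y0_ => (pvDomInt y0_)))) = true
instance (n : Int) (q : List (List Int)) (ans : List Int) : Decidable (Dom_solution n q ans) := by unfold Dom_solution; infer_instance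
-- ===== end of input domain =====

-- One honest line: B replaces A's enumerate-all-combinations-then-test scan by an
-- include/exclude DFS with incremental per-query counters and overshoot pruning
-- (objective: alternative algorithm, same worst-case cost).

-- ===== PORT A =====
-- inner 'for j in range(5): if q[i][j] in num: cnt += 1' (pyGetD is exact where A does not raise; out-of-range access is excluded by Pre_)
def pvCntA (row : List Int) (num : List Int) : Int :=
  (PySem.List.pyRange 0 5 1).foldl
    (fun cnt j => if PySem.List.pyGetD row j 0 ∈ num then cnt + 1 else cnt) 0

-- 'for i in range(len(q)): … if cnt != ans[i]: flag = 1; break' — recursion over the index list models the break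
def pvFlagA (q : List (List Int)) (ans : List Int) (num : List Int) : List Int → Int
  | [] => 0
  | i :: rest =>
      if pvCntA (PySem.List.pyGetD q i []) num ≠ PySem.List.pyGetD ans i 0 then 1
      else pvFlagA q ans num rest

def solution (n : Int) (q : List (List Int)) (ans : List Int) : Int :=
  let nums := PySem.List.combinations (PySem.List.pyRange 1 (n + 1) 1) 5
  nums.foldl
    (fun answer num =>
      if pvFlagA q ans num (PySem.List.pyRange 0 (q.length : Int) 1) = 0 then answer + 1
      else answer) 0

-- ===== PORT B =====
-- 'taken = [c + row[:5].count(x) for c, (row, _) in zip(cnt, pairs)]'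
def pvBump (pairs : List (List Int × Int)) (x : Int) (cnt : List Int) : List Int :=
  (cnt.zip pairs).map
    (fun p => p.1 + (PySem.List.count (PySem.List.slice p.2.1 none (some 5)) x : Int))

-- the nested 'count(pool, r, cnt)' of Source B, step for step
def pvCount (pairs : List (List Int × Int)) (need : List Int) :
    List Int → Int → List Int → Int
  | pool, r, cnt =>
    if (cnt.zip need).any (fun p => decide (p.2 < p.1)) then 0
    else if r == 0 then (if cnt == need then 1 else 0)
    else
      match pool with
      | [] => 0
      | x :: rest =>
          pvCount pairs need rest (r - 1) (pvBump pairs x cnt)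
          + pvCount pairs need rest r cnt
  termination_by pool _ _ => pool.length
  decreasing_by all_goals simp_wf

def solution_alt (n : Int) (q : List (List Int)) (ans : List Int) : Int :=
  let pairs := q.zip ans
  let need := pairs.map Prod.snd
  pvCount pairs need (PySem.List.pyRange 1 (n + 1) 1) 5 (List.replicate pairs.length 0)

-- ===== PRECONDITION & SPEC =====
-- Pre_ excludes the inputs on which A's q[i][j]/ans[i] indexing can raise IndexError (a row of q
-- shorter than 5, or ans shorter than q, while n ≥ 5 makes combinations exist); on the excluded
-- inputs where an early 'break' lets A still return (it then returns 0), B's zip/[:5] reading of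
-- the malformed queries is a different but equally defensible choice.
def Pre_solution (n : Int) (q : List (List Int)) (ans : List Int) : Prop :=
  n < 5 ∨ (q.length ≤ ans.length ∧ ∀ row ∈ q, 5 ≤ row.length)
instance (n : Int) (q : List (List Int)) (ans : List Int) : Decidable (Pre_solution n q ans) := by
  unfold Pre_solution; infer_instance

def pvWitness_solution : Int × List (List Int) × List Int := (6, [[1, 2, 3, 4, 5]], [4])

def Spec_solution (n : Int) (q : List (List Int)) (ans : List Int) (out : Int) : Prop := out = solution_alt n q ans
instance (n : Int) (q : List (List Int)) (ans : List Int) (out : Int) : Decidable (Spec_solution n q ans out) := by unfold Spec_solution; infer_instance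

-- ===== CLAIM (what is proved, stated in full; the proofs are below) =====
def Claim_equal_solution : Prop := ∀ (n : Int) (q : List (List Int)) (ans : List Int), Dom_solution n q ans → Pre_solution n q ans → Spec_solution n q ans (solution n q ans)

-- ===== LEMMAS AND PROOFS =====

-- overlap of a query row's first five entries with a chosen combination (proof-only notion)
def pvOv (row : List Int) (c : List Int) : Int :=
  ((PySem.List.slice row none (some 5)).countP (fun y => decide (y ∈ c)) : Int)

def pvOvVec (pairs : List (List Int × Int)) (c : List Int) : List Int :=
  pairs.map (fun pr => pvOv pr.1 c)

def pvVecAdd (a b : List Int) : List Int := (a.zip b).map (fun p => p.1 + p.2)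

theorem pv_ovvec_nil (pairs : List (List Int × Int)) :
    pvOvVec pairs [] = pairs.map (fun _ => (0 : Int)) := by
  simp [pvOvVec, pvOv]

theorem pv_vecAdd_zero (cnt : List Int) (pairs : List (List Int × Int))
    (h : cnt.length = pairs.length) :
    pvVecAdd cnt (pairs.map (fun _ => (0 : Int))) = cnt := by
  induction cnt generalizing pairs with
  | nil => simp [pvVecAdd]
  | cons a as ih =>
      cases pairs with
      | nil => simp at h
      | cons p ps => simp [pvVecAdd] at *; exact ih ps h

-- countP over the first five entries splits off a fresh element
theorem pv_countP_cons (x : Int) (c : List Int) (hx : x ∉ c) (l : List Int) :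
    l.countP (fun y => decide (y ∈ x :: c)) = l.count x + l.countP (fun y => decide (y ∈ c)) := by
  induction l with
  | nil => simp
  | cons y l ih =>
      rw [List.countP_cons, List.countP_cons, List.count_cons, ih]
      by_cases hy : y = x
      · subst hy
        have hc : ¬ y ∈ c := hx
        simp [hc]
        omega
      · by_cases hc : y ∈ c <;> simp [hy, hc] <;> omega

theorem pv_ov_cons (row : List Int) (x : Int) (c : List Int) (hx : x ∉ c) :
    pvOv row (x :: c) = (PySem.List.count (PySem.List.slice row none (some 5)) x : Int) + pvOv row c := by
  unfold pvOv
  rw [PySem.List.count_eq, pv_countP_cons x c hx]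
  push_cast
  ring

theorem pv_bump_eq (pairs : List (List Int × Int)) (x : Int) (cnt : List Int) (c : List Int)
    (hx : x ∉ c) :
    pvVecAdd cnt (pvOvVec pairs (x :: c)) = pvVecAdd (pvBump pairs x cnt) (pvOvVec pairs c) := by
  unfold pvVecAdd pvBump pvOvVec
  induction pairs generalizing cnt with
  | nil => simp
  | cons pr ps ih =>
      cases cnt with
      | nil => simp
      | cons a as =>
          simp only [List.zip_cons_cons, List.map_cons]
          rw [pv_ov_cons pr.1 x c hx]
          have := ih as
          -- (no rewrite needed on `this`)
          rw [this]
          congr 1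
          ring

-- length bookkeeping
theorem pv_len_vecAdd (a b : List Int) : (pvVecAdd a b).length = min a.length b.length := by
  simp [pvVecAdd]

theorem pv_len_bump (pairs : List (List Int × Int)) (x : Int) (cnt : List Int)
    (h : cnt.length = pairs.length) : (pvBump pairs x cnt).length = pairs.length := by
  simp [pvBump, h]

-- pruning is sound: an overshot counter can never come back to its target
theorem pv_prune (pairs : List (List Int × Int)) (cnt : List Int) (c : List Int)
    (hlen : cnt.length = pairs.length)
    (hp : (cnt.zip (pairs.map Prod.snd)).any (fun p => decide (p.2 < p.1)) = true) :
    (pvVecAdd cnt (pvOvVec pairs c) == pairs.map Prod.snd) = false := by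
  rw [List.any_eq_true] at hp
  obtain ⟨p, hpm, hplt⟩ := hp
  obtain ⟨i, hi, hget⟩ := List.mem_iff_getElem.mp hpm
  rw [List.getElem_zip] at hget
  have hi' : i < pairs.length := by
    simp [List.length_zip, hlen] at hi; omega
  apply beq_eq_false_iff_ne.mpr
  intro heq
  have hlv : (pvOvVec pairs c).length = pairs.length := by simp [pvOvVec]
  have hlen2 : (pvVecAdd cnt (pvOvVec pairs c)).length = pairs.length := by
    rw [pv_len_vecAdd, hlv, hlen]; omega
  have hgi := List.getElem_of_eq heq (show i < (pvVecAdd cnt (pvOvVec pairs c)).length by omega)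
  simp only [pvVecAdd, List.getElem_map, List.getElem_zip] at hgi
  have hov : (0 : Int) ≤ (pvOvVec pairs c)[i]'(by omega) := by
    simp [pvOvVec, pvOv]
  rw [decide_eq_true_eq] at hplt
  rw [← hget] at hplt
  simp only [List.getElem_map] at hplt
  omega

-- MAIN: Source B's DFS counts exactly the members of A's combination list that hit every target
theorem pv_count_eq (pairs : List (List Int × Int)) (pool : List Int) (hnd : pool.Nodup) :
    ∀ (r : Nat) (cnt : List Int), cnt.length = pairs.length →
      pvCount pairs (pairs.map Prod.snd) pool (r : Int) cnt
        = ((PySem.List.combinations pool r).countP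
            (fun c => pvVecAdd cnt (pvOvVec pairs c) == pairs.map Prod.snd) : Int) := by
  induction pool with
  | nil =>
      intro r cnt hlen
      rw [pvCount]
      by_cases hp : (cnt.zip (pairs.map Prod.snd)).any (fun p => decide (p.2 < p.1)) = true
      · rw [if_pos hp]
        have : ∀ c ∈ PySem.List.combinations ([] : List Int) r,
            (pvVecAdd cnt (pvOvVec pairs c) == pairs.map Prod.snd) = false :=
          fun c _ => pv_prune pairs cnt c hlen hp
        rw [List.countP_eq_zero.mpr (by intro c hc; simp [this c hc])]
        simp
      · rw [if_neg hp]
        cases r with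
        | zero =>
            simp only [Nat.cast_zero, beq_self_eq_true, if_true]
            rw [PySem.List.combinations_zero]
            simp only [List.countP_cons, List.countP_nil]
            rw [pv_ovvec_nil, pv_vecAdd_zero cnt pairs hlen]
            by_cases hc : cnt == pairs.map Prod.snd <;> simp_all
        | succ r =>
            have : (((r : Int) + 1) == (0 : Int)) = false := by
              apply beq_eq_false_iff_ne.mpr; omega
            push_cast
            rw [this]
            simp only [Bool.false_eq_true, if_false]
            rw [PySem.List.combinations_nil_succ]
            simp
  | cons x rest ih =>
      intro r cnt hlen
      have hxr : x ∉ rest := (List.nodup_cons.mp hnd).1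
      have hndr : rest.Nodup := (List.nodup_cons.mp hnd).2
      rw [pvCount]
      by_cases hp : (cnt.zip (pairs.map Prod.snd)).any (fun p => decide (p.2 < p.1)) = true
      · rw [if_pos hp]
        rw [List.countP_eq_zero.mpr (by
          intro c hc
          simp [pv_prune pairs cnt c hlen hp])]
        simp
      · rw [if_neg hp]
        cases r with
        | zero =>
            simp only [Nat.cast_zero, beq_self_eq_true, if_true]
            rw [PySem.List.combinations_zero]
            simp only [List.countP_cons, List.countP_nil]
            rw [pv_ovvec_nil, pv_vecAdd_zero cnt pairs hlen]
            by_cases hc : cnt == pairs.map Prod.snd <;> simp_all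
        | succ r =>
            have hz : (((r : Int) + 1) == (0 : Int)) = false := by
              apply beq_eq_false_iff_ne.mpr; omega
            push_cast
            rw [hz]
            simp only [Bool.false_eq_true, if_false]
            have h1 : ((r : Int) + 1 - 1) = (r : Int) := by ring
            rw [h1]
            rw [ih hndr r (pvBump pairs x cnt) (pv_len_bump pairs x cnt hlen)]
            have hih2 := ih hndr (r + 1) cnt hlen
            push_cast at hih2
            rw [hih2]
            rw [PySem.List.combinations_cons_succ]
            rw [List.countP_append, List.countP_map]
            push_cast
            congr 2
            apply List.countP_congr
            intro c hc
            have hcx : x ∉ c := fun hin =>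
              hxr ((PySem.List.sublist_of_mem_combinations hc).mem hin)
            simp only [Function.comp_apply]
            rw [pv_bump_eq pairs x cnt c hcx]

-- ===== A-side characterisation (from the flag/break loop to the same predicate) =====

theorem pv_cnt_eq (row : List Int) (num : List Int) (h : 5 ≤ row.length) :
    pvCntA row num = pvOv row num := by
  match row, h with
  | a :: b :: c :: d :: e :: rest, _ =>
    show pvCntA (a :: b :: c :: d :: e :: rest) num = _
    have hr : PySem.List.pyRange 0 5 1 = [0, 1, 2, 3, 4] := by decide
    have hs : PySem.List.slice (a :: b :: c :: d :: e :: rest) none (some 5)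
        = [a, b, c, d, e] := by
      rw [PySem.List.slice_to _ (by norm_num)]
      rfl
    simp only [pvCntA, pvOv, hr, hs, List.foldl_cons, List.foldl_nil,
      PySem.List.pyGetD_ofNat', List.getD_cons_zero, List.getD_cons_succ,
      List.countP_cons, List.countP_nil, decide_eq_true_eq]
    split_ifs <;> norm_num

theorem pv_flag_zero_iff (q : List (List Int)) (ans : List Int) (num : List Int) :
    ∀ L : List Int, pvFlagA q ans num L = 0
      ↔ ∀ i ∈ L, pvCntA (PySem.List.pyGetD q i []) num = PySem.List.pyGetD ans i 0 := by
  intro L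
  induction L with
  | nil => simp [pvFlagA]
  | cons i rest ih =>
      simp only [pvFlagA]
      split_ifs with h
      · constructor
        · intro h0; exact absurd h0 (by norm_num)
        · intro hall; exact absurd (hall i (by simp)) h
      · simp only [ih, List.mem_cons]
        constructor
        · rintro hall j (rfl | hj)
          · exact not_not.mp h
          · exact hall j hj
        · intro hall j hj; exact hall j (Or.inr hj)

theorem pv_pred_eq (q : List (List Int)) (ans : List Int) (num : List Int)
    (hlen : q.length ≤ ans.length) (hrow : ∀ row ∈ q, 5 ≤ row.length) :
    decide (pvFlagA q ans num (PySem.List.pyRange 0 (q.length : Int) 1) = 0)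
      = (q.zip ans).all (fun pr => pvOv pr.1 num == pr.2) := by
  rw [Bool.eq_iff_iff]
  simp only [decide_eq_true_eq, List.all_eq_true, pv_flag_zero_iff,
    PySem.List.mem_pyRange_one]
  constructor
  · rintro h ⟨qu, a⟩ hmem
    obtain ⟨k, hk, hget⟩ := List.mem_iff_getElem.mp hmem
    rw [List.getElem_zip] at hget
    have hkq : k < q.length := by
      simp [List.length_zip] at hk; omega
    have := h (k : Int) ⟨by positivity, by exact_mod_cast hkq⟩
    rw [PySem.List.pyGetD_natCast, PySem.List.pyGetD_natCast] at this
    have hq' : q.getD k [] = q[k] := List.getD_eq_getElem q [] hkq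
    have ha' : ans.getD k 0 = ans[k]'(lt_of_lt_of_le hkq hlen) :=
      List.getD_eq_getElem ans 0 (lt_of_lt_of_le hkq hlen)
    rw [hq', ha'] at this
    have := (pv_cnt_eq q[k] num (hrow _ (List.getElem_mem hkq))).symm.trans this
    injection hget with hg1 hg2
    subst hg1; subst hg2
    simp at this ⊢
    omega
  · intro h i hi
    obtain ⟨h0, h1⟩ := hi
    set k := i.toNat with hk
    have hik : i = (k : Int) := (Int.toNat_of_nonneg h0).symm
    have hkq : k < q.length := by omega
    have hmem : (q[k], ans[k]'(lt_of_lt_of_le hkq hlen)) ∈ q.zip ans := by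
      apply List.mem_iff_getElem.mpr
      exact ⟨k, by simp [List.length_zip]; omega, by rw [List.getElem_zip]⟩
    have := h _ hmem
    rw [hik, PySem.List.pyGetD_natCast, PySem.List.pyGetD_natCast,
      List.getD_eq_getElem q [] hkq, List.getD_eq_getElem ans 0 (lt_of_lt_of_le hkq hlen)]
    rw [pv_cnt_eq q[k] num (hrow _ (List.getElem_mem hkq))]
    simp [pvOv] at this ⊢
    omega

-- the all-over-zip check is the same as starting B's counters at zero
theorem pv_all_eq_vec (pairs : List (List Int × Int)) (num : List Int) :
    (pairs.all (fun pr => pvOv pr.1 num == pr.2))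
      = (pvVecAdd (List.replicate pairs.length 0) (pvOvVec pairs num) == pairs.map Prod.snd) := by
  induction pairs with
  | nil => simp [pvVecAdd, pvOvVec]
  | cons pr ps ih =>
      simp only [List.all_cons, List.length_cons, List.replicate_succ, pvOvVec,
        List.map_cons, pvVecAdd, List.zip_cons_cons, List.cons_beq_cons, zero_add]
      rw [show (ps.all fun pr => pvOv pr.1 num == pr.2)
          = ((((List.replicate ps.length 0).zip (ps.map fun pr => pvOv pr.1 num)).map
              (fun p => p.1 + p.2)) == ps.map Prod.snd) by
        simpa [pvVecAdd, pvOvVec] using ih]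

-- ===== VERDICT (by name: the statement is the Claim_ definition above) =====
theorem solution_spec : Claim_equal_solution := by
  intro n q ans _ hpre
  unfold Spec_solution solution solution_alt
  have hnd := PySem.List.nodup_pyRange_one 1 (n + 1)
  have h5 : ((5 : Nat) : Int) = (5 : Int) := by norm_num
  have hmain := pv_count_eq (q.zip ans) (PySem.List.pyRange 1 (n + 1) 1) hnd 5
    (List.replicate (q.zip ans).length 0) (by simp)
  rw [h5] at hmain
  simp only [hmain, PySem.List.foldl_ite_add_one]
  rcases hpre with hn | ⟨hlen, hrow⟩
  · have hnil : PySem.List.combinations (PySem.List.pyRange 1 (n + 1) 1) 5 = [] := by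
      apply PySem.List.combinations_eq_nil_of_length_lt
      rw [PySem.List.length_pyRange_one]
      omega
    rw [hnil]
    simp
  · rw [show (0 : Int) + ((PySem.List.combinations (PySem.List.pyRange 1 (n + 1) 1) 5).countP
      (fun num => decide (pvFlagA q ans num (PySem.List.pyRange 0 (q.length : Int) 1) = 0)) : Int)
      = ((PySem.List.combinations (PySem.List.pyRange 1 (n + 1) 1) 5).countP
      (fun num => decide (pvFlagA q ans num (PySem.List.pyRange 0 (q.length : Int) 1) = 0)) : Int) by ring]
    congr 1
    apply List.countP_congr
    intro num _
    rw [pv_pred_eq q ans num hlen hrow, pv_all_eq_vec (q.zip ans) num]
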